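-- pv_equiv track=rewrite | github.com/jmontp/LocoHub | contributor_tools/conversion_scripts/AddBiomechanics/dataset_configs.py | get_task_info_han2023
-- ===== SOURCE A (Python) =====
-- from typing import Dict, Tuple, Optional
--
-- def get_task_info_han2023(original_task: str) -> Tuple[str, str, str]:
--     """
--     Map Han2023 (GroundLink) task to standard format.
--     Dataset has 19 motion types including yoga, dance, sports, and locomotion.
--     """
--     task_lower = original_task.lower()
--
--     # Locomotion
--     if 'walk' in task_lower:
--         return ('level_walking', 'level', '')
--
--     # Yoga poses (balance/static)
--     yoga_poses = ['tree', 'chair', 'warrior', 'dog', 'side_stretch', 'stretch']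
--     for pose in yoga_poses:
--         if pose in task_lower:
--             return ('balance_pose', f'yoga_{pose}', 'category:yoga')
--
--     # Dynamic activities
--     if 'jump' in task_lower or 'jumping' in task_lower:
--         return ('jump', 'jumping_jack', '')
--     if 'hop' in task_lower:
--         return ('hop', 'hop_single', '')
--     if 'squat' in task_lower:
--         return ('squat', 'squat', '')
--     if 'taichi' in task_lower or 'tai_chi' in task_lower:
--         return ('functional_task', 'taichi', 'category:martial_arts')
--     if 'lambada' in task_lower or 'dance' in task_lower:
--         return ('functional_task', 'dance', 'category:dance')
--     if 'high_leg' in task_lower or 'highleg' in task_lower: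
--         return ('functional_task', 'high_leg', '')
--
--     # Sports
--     if 'swing' in task_lower or 'tennis' in task_lower:
--         return ('functional_task', 'tennis_swing', 'category:sports')
--     if 'serv' in task_lower:
--         return ('functional_task', 'tennis_serve', 'category:sports')
--     if 'kick' in task_lower or 'soccer' in task_lower:
--         return ('functional_task', 'soccer_kick', 'category:sports')
--
--     # Static
--     if 'stand' in task_lower or 'idle' in task_lower or 'casual' in task_lower:
--         return ('balance_pose', 'casual_stand', '')
--
--     return ('functional_task', original_task, '')
-- ===== SOURCE B (Python) =====
-- # Sliding-window + hash-table matcher: instead of testing each keyword against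
-- # the whole string, scan every position of the string once, look up the window
-- # slices (one per distinct keyword length) in a dict keyword -> (priority, result),
-- # and keep the entry with the smallest priority (priorities follow A's check order).
-- _HAN_TABLE = {
--     'walk': (0, ('level_walking', 'level', '')),
--     'tree': (1, ('balance_pose', 'yoga_tree', 'category:yoga')),
--     'chair': (2, ('balance_pose', 'yoga_chair', 'category:yoga')),
--     'warrior': (3, ('balance_pose', 'yoga_warrior', 'category:yoga')),
--     'dog': (4, ('balance_pose', 'yoga_dog', 'category:yoga')),
--     'side_stretch': (5, ('balance_pose', 'yoga_side_stretch', 'category:yoga')),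
--     'stretch': (6, ('balance_pose', 'yoga_stretch', 'category:yoga')),
--     'jump': (7, ('jump', 'jumping_jack', '')),
--     'jumping': (7, ('jump', 'jumping_jack', '')),
--     'hop': (8, ('hop', 'hop_single', '')),
--     'squat': (9, ('squat', 'squat', '')),
--     'taichi': (10, ('functional_task', 'taichi', 'category:martial_arts')),
--     'tai_chi': (10, ('functional_task', 'taichi', 'category:martial_arts')),
--     'lambada': (11, ('functional_task', 'dance', 'category:dance')),
--     'dance': (11, ('functional_task', 'dance', 'category:dance')),
--     'high_leg': (12, ('functional_task', 'high_leg', '')),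
--     'highleg': (12, ('functional_task', 'high_leg', '')),
--     'swing': (13, ('functional_task', 'tennis_swing', 'category:sports')),
--     'tennis': (13, ('functional_task', 'tennis_swing', 'category:sports')),
--     'serv': (14, ('functional_task', 'tennis_serve', 'category:sports')),
--     'kick': (15, ('functional_task', 'soccer_kick', 'category:sports')),
--     'soccer': (15, ('functional_task', 'soccer_kick', 'category:sports')),
--     'stand': (16, ('balance_pose', 'casual_stand', '')),
--     'idle': (16, ('balance_pose', 'casual_stand', '')),
--     'casual': (16, ('balance_pose', 'casual_stand', '')),
-- }
-- _HAN_LENS = (3, 4, 5, 6, 7, 8, 12)  # the distinct keyword lengths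
--
--
-- def get_task_info_han2023(original_task: str):
--     t = original_task.lower()
--     best = None
--     for i in range(len(t)):
--         for L in _HAN_LENS:
--             entry = _HAN_TABLE.get(t[i:i + L])
--             if entry is not None and (best is None or entry[0] < best[0]):
--                 best = entry
--     return best[1] if best is not None else ('functional_task', original_task, '')
-- ===== Notes on version B (the rewrite author's own statement) =====
-- stated objective: alternative
-- what changed: Replaced the per-keyword substring tests of the if/elif chain by a sliding-window scan of the lowered string that looks each window slice (one per distinct keyword length) up in a dict keyword->(priority,result) and keeps the minimum-priority hit, priorities encoding A's check order.
import Mathlib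
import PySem

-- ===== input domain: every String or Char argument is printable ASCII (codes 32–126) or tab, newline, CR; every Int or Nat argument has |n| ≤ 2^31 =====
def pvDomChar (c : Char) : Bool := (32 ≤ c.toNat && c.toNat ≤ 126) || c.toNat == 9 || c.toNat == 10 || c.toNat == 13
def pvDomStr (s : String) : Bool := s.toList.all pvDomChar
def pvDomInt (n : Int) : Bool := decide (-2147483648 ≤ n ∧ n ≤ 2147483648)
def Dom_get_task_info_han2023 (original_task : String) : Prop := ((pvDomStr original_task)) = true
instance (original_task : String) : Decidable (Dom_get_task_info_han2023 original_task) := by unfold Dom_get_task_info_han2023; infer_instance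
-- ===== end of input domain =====

-- B replaces A's per-keyword substring tests by a sliding-window scan of the lowered string that looks
-- window slices up in a keyword -> (priority, result) dict and keeps the minimum-priority hit (alternative algorithm).
-- ===== PORT A =====
-- A's yoga for-loop with early return, ported as an explicit recursion returning Option
def hanYogaLoop : List String → String → Option (String × String × String)
  | [], _ => none
  | p :: rest, t =>
      if PySem.Str.isIn p t then some ("balance_pose", "yoga_" ++ p, "category:yoga")
      else hanYogaLoop rest t

def get_task_info_han2023 (original_task : String) : String × String × String :=
  let task_lower := PySem.Str.lower original_task
  if PySem.Str.isIn "walk" task_lower then ("level_walking", "level", "")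
  else
    match hanYogaLoop ["tree", "chair", "warrior", "dog", "side_stretch", "stretch"] task_lower with
    | some r => r
    | none =>
      if PySem.Str.isIn "jump" task_lower || (PySem.Str.isIn "jumping" task_lower) then ("jump", "jumping_jack", "")
      else if PySem.Str.isIn "hop" task_lower then ("hop", "hop_single", "")
      else if PySem.Str.isIn "squat" task_lower then ("squat", "squat", "")
      else if PySem.Str.isIn "taichi" task_lower || (PySem.Str.isIn "tai_chi" task_lower) then ("functional_task", "taichi", "category:martial_arts")
      else if PySem.Str.isIn "lambada" task_lower || (PySem.Str.isIn "dance" task_lower) then ("functional_task", "dance", "category:dance")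
      else if PySem.Str.isIn "high_leg" task_lower || (PySem.Str.isIn "highleg" task_lower) then ("functional_task", "high_leg", "")
      else if PySem.Str.isIn "swing" task_lower || (PySem.Str.isIn "tennis" task_lower) then ("functional_task", "tennis_swing", "category:sports")
      else if PySem.Str.isIn "serv" task_lower then ("functional_task", "tennis_serve", "category:sports")
      else if PySem.Str.isIn "kick" task_lower || (PySem.Str.isIn "soccer" task_lower) then ("functional_task", "soccer_kick", "category:sports")
      else if PySem.Str.isIn "stand" task_lower || (PySem.Str.isIn "idle" task_lower || (PySem.Str.isIn "casual" task_lower)) then ("balance_pose", "casual_stand", "")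
      else ("functional_task", original_task, "")

-- ===== PORT B =====
-- Source B's dict keyword -> (priority, result); priorities encode A's check order
def hanTable : PySem.Dict String (Int × (String × String × String)) := { items := [
  ("walk", ((0 : Int), ("level_walking", "level", ""))),
  ("tree", ((1 : Int), ("balance_pose", "yoga_tree", "category:yoga"))),
  ("chair", ((2 : Int), ("balance_pose", "yoga_chair", "category:yoga"))),
  ("warrior", ((3 : Int), ("balance_pose", "yoga_warrior", "category:yoga"))),
  ("dog", ((4 : Int), ("balance_pose", "yoga_dog", "category:yoga"))),
  ("side_stretch", ((5 : Int), ("balance_pose", "yoga_side_stretch", "category:yoga"))),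
  ("stretch", ((6 : Int), ("balance_pose", "yoga_stretch", "category:yoga"))),
  ("jump", ((7 : Int), ("jump", "jumping_jack", ""))),
  ("jumping", ((7 : Int), ("jump", "jumping_jack", ""))),
  ("hop", ((8 : Int), ("hop", "hop_single", ""))),
  ("squat", ((9 : Int), ("squat", "squat", ""))),
  ("taichi", ((10 : Int), ("functional_task", "taichi", "category:martial_arts"))),
  ("tai_chi", ((10 : Int), ("functional_task", "taichi", "category:martial_arts"))),
  ("lambada", ((11 : Int), ("functional_task", "dance", "category:dance"))),
  ("dance", ((11 : Int), ("functional_task", "dance", "category:dance"))),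
  ("high_leg", ((12 : Int), ("functional_task", "high_leg", ""))),
  ("highleg", ((12 : Int), ("functional_task", "high_leg", ""))),
  ("swing", ((13 : Int), ("functional_task", "tennis_swing", "category:sports"))),
  ("tennis", ((13 : Int), ("functional_task", "tennis_swing", "category:sports"))),
  ("serv", ((14 : Int), ("functional_task", "tennis_serve", "category:sports"))),
  ("kick", ((15 : Int), ("functional_task", "soccer_kick", "category:sports"))),
  ("soccer", ((15 : Int), ("functional_task", "soccer_kick", "category:sports"))),
  ("stand", ((16 : Int), ("balance_pose", "casual_stand", ""))),
  ("idle", ((16 : Int), ("balance_pose", "casual_stand", ""))),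
  ("casual", ((16 : Int), ("balance_pose", "casual_stand", "")))] }

-- the distinct keyword lengths
def hanLens : List Int := [3, 4, 5, 6, 7, 8, 12]

def get_task_info_han2023_alt (original_task : String) : String × String × String :=
  let t := PySem.Str.lower original_task
  let best := (PySem.List.pyRange 0 (PySem.Str.len t)).foldl (fun b i =>
      hanLens.foldl (fun b L =>
        match PySem.Dict.get? hanTable (PySem.Str.slice t (some i) (some (i + L))) with
        | some e =>
          match b with
          | none => some e
          | some y => if e.1 < y.1 then some e else some y
        | none => b) b) none
  match best with
  | some e => e.2
  | none => ("functional_task", original_task, "")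

-- ===== PRECONDITION & SPEC =====
def Spec_get_task_info_han2023 (original_task : String) (out : String × String × String) : Prop := out = get_task_info_han2023_alt original_task
instance (original_task : String) (out : String × String × String) : Decidable (Spec_get_task_info_han2023 original_task out) := by unfold Spec_get_task_info_han2023; infer_instance

-- ===== CLAIM (what is proved, stated in full; the proofs are below) =====
def Claim_equal_get_task_info_han2023 : Prop := ∀ (original_task : String), Dom_get_task_info_han2023 original_task → Spec_get_task_info_han2023 original_task (get_task_info_han2023 original_task)

-- ===== LEMMAS AND PROOFS =====

-- the update step of B's fold, named for the proofs
def hanUpd (b : Option (Int × (String × String × String))) (e : Int × (String × String × String)) : Option (Int × (String × String × String)) :=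
  match b with
  | none => some e
  | some y => if e.1 < y.1 then some e else some y

-- all dict hits collected by B's double loop, as one list
def hanHits (t : String) : List (Int × (String × String × String)) :=
  (PySem.List.pyRange 0 (PySem.Str.len t)).flatMap (fun i =>
    hanLens.filterMap (fun L => PySem.Dict.get? hanTable (PySem.Str.slice t (some i) (some (i + L)))))

set_option maxHeartbeats 1000000 in
lemma alt_eq_minFold (s : String) :
    get_task_info_han2023_alt s =
      (match (hanHits (PySem.Str.lower s)).foldl hanUpd none with
       | some e => e.2
       | none => ("functional_task", s, "")) := by
  have hfold : (hanHits (PySem.Str.lower s)).foldl hanUpd none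
      = (PySem.List.pyRange 0 (PySem.Str.len (PySem.Str.lower s))).foldl (fun b i =>
          hanLens.foldl (fun b L =>
            match PySem.Dict.get? hanTable (PySem.Str.slice (PySem.Str.lower s) (some i) (some (i + L))) with
            | some e =>
              match b with
              | none => some e
              | some y => if e.1 < y.1 then some e else some y
            | none => b) b) none := by
    unfold hanHits
    rw [List.foldl_flatMap]
    congr 1
    funext b i
    rw [List.foldl_filterMap]
    congr 1
    funext acc L
    cases PySem.Dict.get? hanTable (PySem.Str.slice (PySem.Str.lower s) (some i) (some (i + L))) <;>
      simp [hanUpd]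
  simp only [get_task_info_han2023_alt]
  rw [← hfold]

lemma alt_of_minFold (s : String) (e : Int × (String × String × String))
    (h : (hanHits (PySem.Str.lower s)).foldl hanUpd none = some e) :
    get_task_info_han2023_alt s = e.2 := by
  rw [alt_eq_minFold, h]

lemma alt_of_empty (s : String) (h : hanHits (PySem.Str.lower s) = []) :
    get_task_info_han2023_alt s = ("functional_task", s, "") := by
  rw [alt_eq_minFold, h]
  rfl

lemma hanUpd_foldl_acc (L : List (Int × (String × String × String))) :
    ∀ (b e : Int × (String × String × String)), (e = b ∨ e ∈ L) → e.1 ≤ b.1 → (b.1 ≤ e.1 → b = e) →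
    (∀ x ∈ L, e.1 ≤ x.1 ∧ (x.1 ≤ e.1 → x = e)) →
    L.foldl hanUpd (some b) = some e := by
  induction L with
  | nil =>
    intro b e hmem _ _ _
    rcases hmem with rfl | hmem
    · rfl
    · cases hmem
  | cons a tl ih =>
    intro b e hmem hle htie hall
    have ha := hall a (by simp)
    simp only [List.foldl_cons]
    by_cases hab : a.1 < b.1
    · have hu : hanUpd (some b) a = some a := by simp [hanUpd, hab]
      rw [hu]
      refine ih a e ?_ ha.1 ha.2 (fun x hx => hall x (List.mem_cons_of_mem _ hx))
      rcases hmem with rfl | hmem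
      · exact absurd ha.1 (by omega)
      · rcases List.mem_cons.mp hmem with rfl | hmem
        · exact Or.inl rfl
        · exact Or.inr hmem
    · have hu : hanUpd (some b) a = some b := by simp [hanUpd, hab]
      rw [hu]
      refine ih b e ?_ hle htie (fun x hx => hall x (List.mem_cons_of_mem _ hx))
      rcases hmem with rfl | hmem
      · exact Or.inl rfl
      · rcases List.mem_cons.mp hmem with rfl | hmem
        · exact Or.inl (htie (by omega)).symm
        · exact Or.inr hmem

lemma hanMinFold_eq_some (L : List (Int × (String × String × String))) (e : Int × (String × String × String))
    (he : e ∈ L) (hall : ∀ x ∈ L, e.1 ≤ x.1 ∧ (x.1 ≤ e.1 → x = e)) :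
    L.foldl hanUpd none = some e := by
  cases L with
  | nil => cases he
  | cons a tl =>
    have ha := hall a (by simp)
    simp only [List.foldl_cons]
    have hu : hanUpd none a = some a := rfl
    rw [hu]
    refine hanUpd_foldl_acc tl a e ?_ ha.1 ha.2 (fun x hx => hall x (List.mem_cons_of_mem _ hx))
    rcases List.mem_cons.mp he with rfl | hmem
    · exact Or.inl rfl
    · exact Or.inr hmem

lemma mem_hanHits (t : String) (x : Int × (String × String × String)) :
    x ∈ hanHits t ↔ ∃ i : Int, (0 ≤ i ∧ i < PySem.Str.len t) ∧
      ∃ L ∈ hanLens, PySem.Dict.get? hanTable (PySem.Str.slice t (some i) (some (i + L))) = some x := by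
  simp [hanHits, List.mem_flatMap, List.mem_filterMap, PySem.List.mem_pyRange_one]

lemma isIn_of_slice (t k : String) (i L : Int) (hi : 0 ≤ i) (hL : 0 ≤ L)
    (hs : PySem.Str.slice t (some i) (some (i + L)) = k) :
    PySem.Str.isIn k t = true := by
  rw [PySem.Str.isIn_eq, ← PySem.Chars.exists_prefix_drop_iff_isIn]
  refine ⟨i.toNat, ?_⟩
  have h := congrArg String.toList hs
  rw [PySem.Str.toList_slice, PySem.Chars.slice_eq_listSlice,
    PySem.List.slice_toNat _ hi (by omega)] at h
  exact h ▸ List.take_prefix _ _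

lemma mem_hanHits_of_isIn (t k : String) (e : Int × (String × String × String))
    (hget : PySem.Dict.get? hanTable k = some e)
    (hlen : ((k.toList.length : Int)) ∈ hanLens) (hk : k.toList ≠ [])
    (hin : PySem.Str.isIn k t = true) : e ∈ hanHits t := by
  rw [PySem.Str.isIn_eq, ← PySem.Chars.exists_prefix_drop_iff_isIn] at hin
  obtain ⟨j, hj⟩ := hin
  have hjlt : j < t.toList.length := by
    by_contra hcon
    rw [List.drop_eq_nil_of_le (Nat.le_of_not_lt hcon)] at hj
    exact hk (List.prefix_nil.mp hj)
  have hslice : PySem.Str.slice t (some (j : Int)) (some ((j : Int) + (k.toList.length : Int))) = k := by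
    rw [← String.toList_inj, PySem.Str.toList_slice, PySem.Chars.slice_eq_listSlice,
      PySem.List.slice_natCast_add]
    exact (List.prefix_iff_eq_take.mp hj).symm
  rw [mem_hanHits]
  refine ⟨(j : Int), ⟨by positivity, by rw [PySem.Str.len_eq]; exact_mod_cast hjlt⟩,
    (k.toList.length : Int), hlen, ?_⟩
  rw [hslice, hget]

set_option maxHeartbeats 2000000 in
lemma hanHits_iff (t : String) (x : Int × (String × String × String)) :
    x ∈ hanHits t ↔
    ((PySem.Str.isIn "walk" t = true ∧ x = ((0 : Int), ("level_walking", "level", ""))) ∨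
    (PySem.Str.isIn "tree" t = true ∧ x = ((1 : Int), ("balance_pose", "yoga_tree", "category:yoga"))) ∨
    (PySem.Str.isIn "chair" t = true ∧ x = ((2 : Int), ("balance_pose", "yoga_chair", "category:yoga"))) ∨
    (PySem.Str.isIn "warrior" t = true ∧ x = ((3 : Int), ("balance_pose", "yoga_warrior", "category:yoga"))) ∨
    (PySem.Str.isIn "dog" t = true ∧ x = ((4 : Int), ("balance_pose", "yoga_dog", "category:yoga"))) ∨
    (PySem.Str.isIn "side_stretch" t = true ∧ x = ((5 : Int), ("balance_pose", "yoga_side_stretch", "category:yoga"))) ∨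
    (PySem.Str.isIn "stretch" t = true ∧ x = ((6 : Int), ("balance_pose", "yoga_stretch", "category:yoga"))) ∨
    ((PySem.Str.isIn "jump" t = true ∨ PySem.Str.isIn "jumping" t = true) ∧ x = ((7 : Int), ("jump", "jumping_jack", ""))) ∨
    (PySem.Str.isIn "hop" t = true ∧ x = ((8 : Int), ("hop", "hop_single", ""))) ∨
    (PySem.Str.isIn "squat" t = true ∧ x = ((9 : Int), ("squat", "squat", ""))) ∨
    ((PySem.Str.isIn "taichi" t = true ∨ PySem.Str.isIn "tai_chi" t = true) ∧ x = ((10 : Int), ("functional_task", "taichi", "category:martial_arts"))) ∨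
    ((PySem.Str.isIn "lambada" t = true ∨ PySem.Str.isIn "dance" t = true) ∧ x = ((11 : Int), ("functional_task", "dance", "category:dance"))) ∨
    ((PySem.Str.isIn "high_leg" t = true ∨ PySem.Str.isIn "highleg" t = true) ∧ x = ((12 : Int), ("functional_task", "high_leg", ""))) ∨
    ((PySem.Str.isIn "swing" t = true ∨ PySem.Str.isIn "tennis" t = true) ∧ x = ((13 : Int), ("functional_task", "tennis_swing", "category:sports"))) ∨
    (PySem.Str.isIn "serv" t = true ∧ x = ((14 : Int), ("functional_task", "tennis_serve", "category:sports"))) ∨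
    ((PySem.Str.isIn "kick" t = true ∨ PySem.Str.isIn "soccer" t = true) ∧ x = ((15 : Int), ("functional_task", "soccer_kick", "category:sports"))) ∨
    ((PySem.Str.isIn "stand" t = true ∨ PySem.Str.isIn "idle" t = true ∨ PySem.Str.isIn "casual" t = true) ∧ x = ((16 : Int), ("balance_pose", "casual_stand", "")))) := by
  constructor
  · intro hx
    rw [mem_hanHits] at hx
    obtain ⟨i, ⟨hi0, hilt⟩, L, hLmem, hget⟩ := hx
    have hL : (0 : Int) ≤ L := by
      simp [hanLens] at hLmem
      omega
    have hpair := PySem.Dict.mem_items_of_get?_eq_some _ hget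
    simp only [hanTable, List.mem_cons, List.not_mem_nil, or_false, Prod.mk.injEq] at hpair
    rcases hpair with ⟨hkey, rfl⟩|⟨hkey, rfl⟩|⟨hkey, rfl⟩|⟨hkey, rfl⟩|⟨hkey, rfl⟩|⟨hkey, rfl⟩|⟨hkey, rfl⟩|⟨hkey, rfl⟩|⟨hkey, rfl⟩|⟨hkey, rfl⟩|⟨hkey, rfl⟩|⟨hkey, rfl⟩|⟨hkey, rfl⟩|⟨hkey, rfl⟩|⟨hkey, rfl⟩|⟨hkey, rfl⟩|⟨hkey, rfl⟩|⟨hkey, rfl⟩|⟨hkey, rfl⟩|⟨hkey, rfl⟩|⟨hkey, rfl⟩|⟨hkey, rfl⟩|⟨hkey, rfl⟩|⟨hkey, rfl⟩|⟨hkey, rfl⟩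
    · exact Or.inl ⟨(isIn_of_slice t "walk" i L hi0 hL hkey), rfl⟩
    · exact Or.inr (Or.inl ⟨(isIn_of_slice t "tree" i L hi0 hL hkey), rfl⟩)
    · exact Or.inr (Or.inr (Or.inl ⟨(isIn_of_slice t "chair" i L hi0 hL hkey), rfl⟩))
    · exact Or.inr (Or.inr (Or.inr (Or.inl ⟨(isIn_of_slice t "warrior" i L hi0 hL hkey), rfl⟩)))
    · exact Or.inr (Or.inr (Or.inr (Or.inr (Or.inl ⟨(isIn_of_slice t "dog" i L hi0 hL hkey), rfl⟩))))
    · exact Or.inr (Or.inr (Or.inr (Or.inr (Or.inr (Or.inl ⟨(isIn_of_slice t "side_stretch" i L hi0 hL hkey), rfl⟩)))))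
    · exact Or.inr (Or.inr (Or.inr (Or.inr (Or.inr (Or.inr (Or.inl ⟨(isIn_of_slice t "stretch" i L hi0 hL hkey), rfl⟩))))))
    · exact Or.inr (Or.inr (Or.inr (Or.inr (Or.inr (Or.inr (Or.inr (Or.inl ⟨Or.inl (isIn_of_slice t "jump" i L hi0 hL hkey), rfl⟩)))))))
    · exact Or.inr (Or.inr (Or.inr (Or.inr (Or.inr (Or.inr (Or.inr (Or.inl ⟨Or.inr ((isIn_of_slice t "jumping" i L hi0 hL hkey)), rfl⟩)))))))
    · exact Or.inr (Or.inr (Or.inr (Or.inr (Or.inr (Or.inr (Or.inr (Or.inr (Or.inl ⟨(isIn_of_slice t "hop" i L hi0 hL hkey), rfl⟩))))))))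
    · exact Or.inr (Or.inr (Or.inr (Or.inr (Or.inr (Or.inr (Or.inr (Or.inr (Or.inr (Or.inl ⟨(isIn_of_slice t "squat" i L hi0 hL hkey), rfl⟩)))))))))
    · exact Or.inr (Or.inr (Or.inr (Or.inr (Or.inr (Or.inr (Or.inr (Or.inr (Or.inr (Or.inr (Or.inl ⟨Or.inl (isIn_of_slice t "taichi" i L hi0 hL hkey), rfl⟩))))))))))
    · exact Or.inr (Or.inr (Or.inr (Or.inr (Or.inr (Or.inr (Or.inr (Or.inr (Or.inr (Or.inr (Or.inl ⟨Or.inr ((isIn_of_slice t "tai_chi" i L hi0 hL hkey)), rfl⟩))))))))))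
    · exact Or.inr (Or.inr (Or.inr (Or.inr (Or.inr (Or.inr (Or.inr (Or.inr (Or.inr (Or.inr (Or.inr (Or.inl ⟨Or.inl (isIn_of_slice t "lambada" i L hi0 hL hkey), rfl⟩)))))))))))
    · exact Or.inr (Or.inr (Or.inr (Or.inr (Or.inr (Or.inr (Or.inr (Or.inr (Or.inr (Or.inr (Or.inr (Or.inl ⟨Or.inr ((isIn_of_slice t "dance" i L hi0 hL hkey)), rfl⟩)))))))))))
    · exact Or.inr (Or.inr (Or.inr (Or.inr (Or.inr (Or.inr (Or.inr (Or.inr (Or.inr (Or.inr (Or.inr (Or.inr (Or.inl ⟨Or.inl (isIn_of_slice t "high_leg" i L hi0 hL hkey), rfl⟩))))))))))))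
    · exact Or.inr (Or.inr (Or.inr (Or.inr (Or.inr (Or.inr (Or.inr (Or.inr (Or.inr (Or.inr (Or.inr (Or.inr (Or.inl ⟨Or.inr ((isIn_of_slice t "highleg" i L hi0 hL hkey)), rfl⟩))))))))))))
    · exact Or.inr (Or.inr (Or.inr (Or.inr (Or.inr (Or.inr (Or.inr (Or.inr (Or.inr (Or.inr (Or.inr (Or.inr (Or.inr (Or.inl ⟨Or.inl (isIn_of_slice t "swing" i L hi0 hL hkey), rfl⟩)))))))))))))
    · exact Or.inr (Or.inr (Or.inr (Or.inr (Or.inr (Or.inr (Or.inr (Or.inr (Or.inr (Or.inr (Or.inr (Or.inr (Or.inr (Or.inl ⟨Or.inr ((isIn_of_slice t "tennis" i L hi0 hL hkey)), rfl⟩)))))))))))))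
    · exact Or.inr (Or.inr (Or.inr (Or.inr (Or.inr (Or.inr (Or.inr (Or.inr (Or.inr (Or.inr (Or.inr (Or.inr (Or.inr (Or.inr (Or.inl ⟨(isIn_of_slice t "serv" i L hi0 hL hkey), rfl⟩))))))))))))))
    · exact Or.inr (Or.inr (Or.inr (Or.inr (Or.inr (Or.inr (Or.inr (Or.inr (Or.inr (Or.inr (Or.inr (Or.inr (Or.inr (Or.inr (Or.inr (Or.inl ⟨Or.inl (isIn_of_slice t "kick" i L hi0 hL hkey), rfl⟩)))))))))))))))
    · exact Or.inr (Or.inr (Or.inr (Or.inr (Or.inr (Or.inr (Or.inr (Or.inr (Or.inr (Or.inr (Or.inr (Or.inr (Or.inr (Or.inr (Or.inr (Or.inl ⟨Or.inr ((isIn_of_slice t "soccer" i L hi0 hL hkey)), rfl⟩)))))))))))))))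
    · exact Or.inr (Or.inr (Or.inr (Or.inr (Or.inr (Or.inr (Or.inr (Or.inr (Or.inr (Or.inr (Or.inr (Or.inr (Or.inr (Or.inr (Or.inr (Or.inr (⟨Or.inl (isIn_of_slice t "stand" i L hi0 hL hkey), rfl⟩))))))))))))))))
    · exact Or.inr (Or.inr (Or.inr (Or.inr (Or.inr (Or.inr (Or.inr (Or.inr (Or.inr (Or.inr (Or.inr (Or.inr (Or.inr (Or.inr (Or.inr (Or.inr (⟨Or.inr (Or.inl (isIn_of_slice t "idle" i L hi0 hL hkey)), rfl⟩))))))))))))))))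
    · exact Or.inr (Or.inr (Or.inr (Or.inr (Or.inr (Or.inr (Or.inr (Or.inr (Or.inr (Or.inr (Or.inr (Or.inr (Or.inr (Or.inr (Or.inr (Or.inr (⟨Or.inr (Or.inr ((isIn_of_slice t "casual" i L hi0 hL hkey))), rfl⟩))))))))))))))))
  · intro h
    rcases h with ⟨hin, rfl⟩|⟨hin, rfl⟩|⟨hin, rfl⟩|⟨hin, rfl⟩|⟨hin, rfl⟩|⟨hin, rfl⟩|⟨hin, rfl⟩|⟨hin, rfl⟩|⟨hin, rfl⟩|⟨hin, rfl⟩|⟨hin, rfl⟩|⟨hin, rfl⟩|⟨hin, rfl⟩|⟨hin, rfl⟩|⟨hin, rfl⟩|⟨hin, rfl⟩|⟨hin, rfl⟩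
    · exact mem_hanHits_of_isIn t "walk" _ rfl (by decide) (by decide) hin
    · exact mem_hanHits_of_isIn t "tree" _ rfl (by decide) (by decide) hin
    · exact mem_hanHits_of_isIn t "chair" _ rfl (by decide) (by decide) hin
    · exact mem_hanHits_of_isIn t "warrior" _ rfl (by decide) (by decide) hin
    · exact mem_hanHits_of_isIn t "dog" _ rfl (by decide) (by decide) hin
    · exact mem_hanHits_of_isIn t "side_stretch" _ rfl (by decide) (by decide) hin
    · exact mem_hanHits_of_isIn t "stretch" _ rfl (by decide) (by decide) hin
    · rcases hin with hin|hin
      · exact mem_hanHits_of_isIn t "jump" _ rfl (by decide) (by decide) hin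
      · exact mem_hanHits_of_isIn t "jumping" _ rfl (by decide) (by decide) hin
    · exact mem_hanHits_of_isIn t "hop" _ rfl (by decide) (by decide) hin
    · exact mem_hanHits_of_isIn t "squat" _ rfl (by decide) (by decide) hin
    · rcases hin with hin|hin
      · exact mem_hanHits_of_isIn t "taichi" _ rfl (by decide) (by decide) hin
      · exact mem_hanHits_of_isIn t "tai_chi" _ rfl (by decide) (by decide) hin
    · rcases hin with hin|hin
      · exact mem_hanHits_of_isIn t "lambada" _ rfl (by decide) (by decide) hin
      · exact mem_hanHits_of_isIn t "dance" _ rfl (by decide) (by decide) hin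
    · rcases hin with hin|hin
      · exact mem_hanHits_of_isIn t "high_leg" _ rfl (by decide) (by decide) hin
      · exact mem_hanHits_of_isIn t "highleg" _ rfl (by decide) (by decide) hin
    · rcases hin with hin|hin
      · exact mem_hanHits_of_isIn t "swing" _ rfl (by decide) (by decide) hin
      · exact mem_hanHits_of_isIn t "tennis" _ rfl (by decide) (by decide) hin
    · exact mem_hanHits_of_isIn t "serv" _ rfl (by decide) (by decide) hin
    · rcases hin with hin|hin
      · exact mem_hanHits_of_isIn t "kick" _ rfl (by decide) (by decide) hin
      · exact mem_hanHits_of_isIn t "soccer" _ rfl (by decide) (by decide) hin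
    · rcases hin with hin|hin|hin
      · exact mem_hanHits_of_isIn t "stand" _ rfl (by decide) (by decide) hin
      · exact mem_hanHits_of_isIn t "idle" _ rfl (by decide) (by decide) hin
      · exact mem_hanHits_of_isIn t "casual" _ rfl (by decide) (by decide) hin

-- ===== VERDICT (by name: the statement is the Claim_ definition above) =====
set_option maxHeartbeats 2000000 in
theorem get_task_info_han2023_spec : Claim_equal_get_task_info_han2023 := by
  intro s _
  unfold Spec_get_task_info_han2023 get_task_info_han2023
  simp only [hanYogaLoop]
  cases h0 : (PySem.Str.isIn "walk" (PySem.Str.lower s))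
  case true =>
    have hmem : ((0 : Int), ("level_walking", "level", "")) ∈ hanHits (PySem.Str.lower s) := (hanHits_iff (PySem.Str.lower s) _).mpr (Or.inl ⟨h0, rfl⟩)
    have hall : ∀ x ∈ hanHits (PySem.Str.lower s), (((0 : Int), ("level_walking", "level", ""))).1 ≤ x.1 ∧ (x.1 ≤ (((0 : Int), ("level_walking", "level", ""))).1 → x = ((0 : Int), ("level_walking", "level", ""))) := by
      intro x hx
      rcases (hanHits_iff (PySem.Str.lower s) x).mp hx with ⟨hin, rfl⟩|⟨hin, rfl⟩|⟨hin, rfl⟩|⟨hin, rfl⟩|⟨hin, rfl⟩|⟨hin, rfl⟩|⟨hin, rfl⟩|⟨hin, rfl⟩|⟨hin, rfl⟩|⟨hin, rfl⟩|⟨hin, rfl⟩|⟨hin, rfl⟩|⟨hin, rfl⟩|⟨hin, rfl⟩|⟨hin, rfl⟩|⟨hin, rfl⟩|⟨hin, rfl⟩ <;> decide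
    rw [alt_of_minFold s _ (hanMinFold_eq_some _ _ hmem hall)]
    rfl
  case false =>
    cases h1 : (PySem.Str.isIn "tree" (PySem.Str.lower s))
    case true =>
      have hmem : ((1 : Int), ("balance_pose", "yoga_tree", "category:yoga")) ∈ hanHits (PySem.Str.lower s) := (hanHits_iff (PySem.Str.lower s) _).mpr (Or.inr (Or.inl ⟨h1, rfl⟩))
      have hall : ∀ x ∈ hanHits (PySem.Str.lower s), (((1 : Int), ("balance_pose", "yoga_tree", "category:yoga"))).1 ≤ x.1 ∧ (x.1 ≤ (((1 : Int), ("balance_pose", "yoga_tree", "category:yoga"))).1 → x = ((1 : Int), ("balance_pose", "yoga_tree", "category:yoga"))) := by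
        intro x hx
        rcases (hanHits_iff (PySem.Str.lower s) x).mp hx with ⟨hin, rfl⟩|⟨hin, rfl⟩|⟨hin, rfl⟩|⟨hin, rfl⟩|⟨hin, rfl⟩|⟨hin, rfl⟩|⟨hin, rfl⟩|⟨hin, rfl⟩|⟨hin, rfl⟩|⟨hin, rfl⟩|⟨hin, rfl⟩|⟨hin, rfl⟩|⟨hin, rfl⟩|⟨hin, rfl⟩|⟨hin, rfl⟩|⟨hin, rfl⟩|⟨hin, rfl⟩ <;>
          first | decide | simp_all
      rw [alt_of_minFold s _ (hanMinFold_eq_some _ _ hmem hall)]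
      rfl
    case false =>
      cases h2 : (PySem.Str.isIn "chair" (PySem.Str.lower s))
      case true =>
        have hmem : ((2 : Int), ("balance_pose", "yoga_chair", "category:yoga")) ∈ hanHits (PySem.Str.lower s) := (hanHits_iff (PySem.Str.lower s) _).mpr (Or.inr (Or.inr (Or.inl ⟨h2, rfl⟩)))
        have hall : ∀ x ∈ hanHits (PySem.Str.lower s), (((2 : Int), ("balance_pose", "yoga_chair", "category:yoga"))).1 ≤ x.1 ∧ (x.1 ≤ (((2 : Int), ("balance_pose", "yoga_chair", "category:yoga"))).1 → x = ((2 : Int), ("balance_pose", "yoga_chair", "category:yoga"))) := by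
          intro x hx
          rcases (hanHits_iff (PySem.Str.lower s) x).mp hx with ⟨hin, rfl⟩|⟨hin, rfl⟩|⟨hin, rfl⟩|⟨hin, rfl⟩|⟨hin, rfl⟩|⟨hin, rfl⟩|⟨hin, rfl⟩|⟨hin, rfl⟩|⟨hin, rfl⟩|⟨hin, rfl⟩|⟨hin, rfl⟩|⟨hin, rfl⟩|⟨hin, rfl⟩|⟨hin, rfl⟩|⟨hin, rfl⟩|⟨hin, rfl⟩|⟨hin, rfl⟩ <;>
            first | decide | simp_all
        rw [alt_of_minFold s _ (hanMinFold_eq_some _ _ hmem hall)]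
        rfl
      case false =>
        cases h3 : (PySem.Str.isIn "warrior" (PySem.Str.lower s))
        case true =>
          have hmem : ((3 : Int), ("balance_pose", "yoga_warrior", "category:yoga")) ∈ hanHits (PySem.Str.lower s) := (hanHits_iff (PySem.Str.lower s) _).mpr (Or.inr (Or.inr (Or.inr (Or.inl ⟨h3, rfl⟩))))
          have hall : ∀ x ∈ hanHits (PySem.Str.lower s), (((3 : Int), ("balance_pose", "yoga_warrior", "category:yoga"))).1 ≤ x.1 ∧ (x.1 ≤ (((3 : Int), ("balance_pose", "yoga_warrior", "category:yoga"))).1 → x = ((3 : Int), ("balance_pose", "yoga_warrior", "category:yoga"))) := by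
            intro x hx
            rcases (hanHits_iff (PySem.Str.lower s) x).mp hx with ⟨hin, rfl⟩|⟨hin, rfl⟩|⟨hin, rfl⟩|⟨hin, rfl⟩|⟨hin, rfl⟩|⟨hin, rfl⟩|⟨hin, rfl⟩|⟨hin, rfl⟩|⟨hin, rfl⟩|⟨hin, rfl⟩|⟨hin, rfl⟩|⟨hin, rfl⟩|⟨hin, rfl⟩|⟨hin, rfl⟩|⟨hin, rfl⟩|⟨hin, rfl⟩|⟨hin, rfl⟩ <;>
              first | decide | simp_all
          rw [alt_of_minFold s _ (hanMinFold_eq_some _ _ hmem hall)]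
          rfl
        case false =>
          cases h4 : (PySem.Str.isIn "dog" (PySem.Str.lower s))
          case true =>
            have hmem : ((4 : Int), ("balance_pose", "yoga_dog", "category:yoga")) ∈ hanHits (PySem.Str.lower s) := (hanHits_iff (PySem.Str.lower s) _).mpr (Or.inr (Or.inr (Or.inr (Or.inr (Or.inl ⟨h4, rfl⟩)))))
            have hall : ∀ x ∈ hanHits (PySem.Str.lower s), (((4 : Int), ("balance_pose", "yoga_dog", "category:yoga"))).1 ≤ x.1 ∧ (x.1 ≤ (((4 : Int), ("balance_pose", "yoga_dog", "category:yoga"))).1 → x = ((4 : Int), ("balance_pose", "yoga_dog", "category:yoga"))) := by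
              intro x hx
              rcases (hanHits_iff (PySem.Str.lower s) x).mp hx with ⟨hin, rfl⟩|⟨hin, rfl⟩|⟨hin, rfl⟩|⟨hin, rfl⟩|⟨hin, rfl⟩|⟨hin, rfl⟩|⟨hin, rfl⟩|⟨hin, rfl⟩|⟨hin, rfl⟩|⟨hin, rfl⟩|⟨hin, rfl⟩|⟨hin, rfl⟩|⟨hin, rfl⟩|⟨hin, rfl⟩|⟨hin, rfl⟩|⟨hin, rfl⟩|⟨hin, rfl⟩ <;>
                first | decide | simp_all
            rw [alt_of_minFold s _ (hanMinFold_eq_some _ _ hmem hall)]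
            rfl
          case false =>
            cases h5 : (PySem.Str.isIn "side_stretch" (PySem.Str.lower s))
            case true =>
              have hmem : ((5 : Int), ("balance_pose", "yoga_side_stretch", "category:yoga")) ∈ hanHits (PySem.Str.lower s) := (hanHits_iff (PySem.Str.lower s) _).mpr (Or.inr (Or.inr (Or.inr (Or.inr (Or.inr (Or.inl ⟨h5, rfl⟩))))))
              have hall : ∀ x ∈ hanHits (PySem.Str.lower s), (((5 : Int), ("balance_pose", "yoga_side_stretch", "category:yoga"))).1 ≤ x.1 ∧ (x.1 ≤ (((5 : Int), ("balance_pose", "yoga_side_stretch", "category:yoga"))).1 → x = ((5 : Int), ("balance_pose", "yoga_side_stretch", "category:yoga"))) := by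
                intro x hx
                rcases (hanHits_iff (PySem.Str.lower s) x).mp hx with ⟨hin, rfl⟩|⟨hin, rfl⟩|⟨hin, rfl⟩|⟨hin, rfl⟩|⟨hin, rfl⟩|⟨hin, rfl⟩|⟨hin, rfl⟩|⟨hin, rfl⟩|⟨hin, rfl⟩|⟨hin, rfl⟩|⟨hin, rfl⟩|⟨hin, rfl⟩|⟨hin, rfl⟩|⟨hin, rfl⟩|⟨hin, rfl⟩|⟨hin, rfl⟩|⟨hin, rfl⟩ <;>
                  first | decide | simp_all
              rw [alt_of_minFold s _ (hanMinFold_eq_some _ _ hmem hall)]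
              rfl
            case false =>
              cases h6 : (PySem.Str.isIn "stretch" (PySem.Str.lower s))
              case true =>
                have hmem : ((6 : Int), ("balance_pose", "yoga_stretch", "category:yoga")) ∈ hanHits (PySem.Str.lower s) := (hanHits_iff (PySem.Str.lower s) _).mpr (Or.inr (Or.inr (Or.inr (Or.inr (Or.inr (Or.inr (Or.inl ⟨h6, rfl⟩)))))))
                have hall : ∀ x ∈ hanHits (PySem.Str.lower s), (((6 : Int), ("balance_pose", "yoga_stretch", "category:yoga"))).1 ≤ x.1 ∧ (x.1 ≤ (((6 : Int), ("balance_pose", "yoga_stretch", "category:yoga"))).1 → x = ((6 : Int), ("balance_pose", "yoga_stretch", "category:yoga"))) := by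
                  intro x hx
                  rcases (hanHits_iff (PySem.Str.lower s) x).mp hx with ⟨hin, rfl⟩|⟨hin, rfl⟩|⟨hin, rfl⟩|⟨hin, rfl⟩|⟨hin, rfl⟩|⟨hin, rfl⟩|⟨hin, rfl⟩|⟨hin, rfl⟩|⟨hin, rfl⟩|⟨hin, rfl⟩|⟨hin, rfl⟩|⟨hin, rfl⟩|⟨hin, rfl⟩|⟨hin, rfl⟩|⟨hin, rfl⟩|⟨hin, rfl⟩|⟨hin, rfl⟩ <;>
                    first | decide | simp_all
                rw [alt_of_minFold s _ (hanMinFold_eq_some _ _ hmem hall)]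
                rfl
              case false =>
                cases h7 : (PySem.Str.isIn "jump" (PySem.Str.lower s) || (PySem.Str.isIn "jumping" (PySem.Str.lower s)))
                case true =>
                  simp only [Bool.or_eq_true] at h7
                  have hmem : ((7 : Int), ("jump", "jumping_jack", "")) ∈ hanHits (PySem.Str.lower s) := (hanHits_iff (PySem.Str.lower s) _).mpr (Or.inr (Or.inr (Or.inr (Or.inr (Or.inr (Or.inr (Or.inr (Or.inl ⟨h7, rfl⟩))))))))
                  have hall : ∀ x ∈ hanHits (PySem.Str.lower s), (((7 : Int), ("jump", "jumping_jack", ""))).1 ≤ x.1 ∧ (x.1 ≤ (((7 : Int), ("jump", "jumping_jack", ""))).1 → x = ((7 : Int), ("jump", "jumping_jack", ""))) := by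
                    intro x hx
                    rcases (hanHits_iff (PySem.Str.lower s) x).mp hx with ⟨hin, rfl⟩|⟨hin, rfl⟩|⟨hin, rfl⟩|⟨hin, rfl⟩|⟨hin, rfl⟩|⟨hin, rfl⟩|⟨hin, rfl⟩|⟨hin, rfl⟩|⟨hin, rfl⟩|⟨hin, rfl⟩|⟨hin, rfl⟩|⟨hin, rfl⟩|⟨hin, rfl⟩|⟨hin, rfl⟩|⟨hin, rfl⟩|⟨hin, rfl⟩|⟨hin, rfl⟩ <;>
                      first | decide | simp_all
                  rw [alt_of_minFold s _ (hanMinFold_eq_some _ _ hmem hall)]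
                  rfl
                case false =>
                  cases h8 : (PySem.Str.isIn "hop" (PySem.Str.lower s))
                  case true =>
                    have hmem : ((8 : Int), ("hop", "hop_single", "")) ∈ hanHits (PySem.Str.lower s) := (hanHits_iff (PySem.Str.lower s) _).mpr (Or.inr (Or.inr (Or.inr (Or.inr (Or.inr (Or.inr (Or.inr (Or.inr (Or.inl ⟨h8, rfl⟩)))))))))
                    have hall : ∀ x ∈ hanHits (PySem.Str.lower s), (((8 : Int), ("hop", "hop_single", ""))).1 ≤ x.1 ∧ (x.1 ≤ (((8 : Int), ("hop", "hop_single", ""))).1 → x = ((8 : Int), ("hop", "hop_single", ""))) := by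
                      intro x hx
                      rcases (hanHits_iff (PySem.Str.lower s) x).mp hx with ⟨hin, rfl⟩|⟨hin, rfl⟩|⟨hin, rfl⟩|⟨hin, rfl⟩|⟨hin, rfl⟩|⟨hin, rfl⟩|⟨hin, rfl⟩|⟨hin, rfl⟩|⟨hin, rfl⟩|⟨hin, rfl⟩|⟨hin, rfl⟩|⟨hin, rfl⟩|⟨hin, rfl⟩|⟨hin, rfl⟩|⟨hin, rfl⟩|⟨hin, rfl⟩|⟨hin, rfl⟩ <;>
                        first | decide | simp_all
                    rw [alt_of_minFold s _ (hanMinFold_eq_some _ _ hmem hall)]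
                    rfl
                  case false =>
                    cases h9 : (PySem.Str.isIn "squat" (PySem.Str.lower s))
                    case true =>
                      have hmem : ((9 : Int), ("squat", "squat", "")) ∈ hanHits (PySem.Str.lower s) := (hanHits_iff (PySem.Str.lower s) _).mpr (Or.inr (Or.inr (Or.inr (Or.inr (Or.inr (Or.inr (Or.inr (Or.inr (Or.inr (Or.inl ⟨h9, rfl⟩))))))))))
                      have hall : ∀ x ∈ hanHits (PySem.Str.lower s), (((9 : Int), ("squat", "squat", ""))).1 ≤ x.1 ∧ (x.1 ≤ (((9 : Int), ("squat", "squat", ""))).1 → x = ((9 : Int), ("squat", "squat", ""))) := by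
                        intro x hx
                        rcases (hanHits_iff (PySem.Str.lower s) x).mp hx with ⟨hin, rfl⟩|⟨hin, rfl⟩|⟨hin, rfl⟩|⟨hin, rfl⟩|⟨hin, rfl⟩|⟨hin, rfl⟩|⟨hin, rfl⟩|⟨hin, rfl⟩|⟨hin, rfl⟩|⟨hin, rfl⟩|⟨hin, rfl⟩|⟨hin, rfl⟩|⟨hin, rfl⟩|⟨hin, rfl⟩|⟨hin, rfl⟩|⟨hin, rfl⟩|⟨hin, rfl⟩ <;>
                          first | decide | simp_all
                      rw [alt_of_minFold s _ (hanMinFold_eq_some _ _ hmem hall)]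
                      rfl
                    case false =>
                      cases h10 : (PySem.Str.isIn "taichi" (PySem.Str.lower s) || (PySem.Str.isIn "tai_chi" (PySem.Str.lower s)))
                      case true =>
                        simp only [Bool.or_eq_true] at h10
                        have hmem : ((10 : Int), ("functional_task", "taichi", "category:martial_arts")) ∈ hanHits (PySem.Str.lower s) := (hanHits_iff (PySem.Str.lower s) _).mpr (Or.inr (Or.inr (Or.inr (Or.inr (Or.inr (Or.inr (Or.inr (Or.inr (Or.inr (Or.inr (Or.inl ⟨h10, rfl⟩)))))))))))
                        have hall : ∀ x ∈ hanHits (PySem.Str.lower s), (((10 : Int), ("functional_task", "taichi", "category:martial_arts"))).1 ≤ x.1 ∧ (x.1 ≤ (((10 : Int), ("functional_task", "taichi", "category:martial_arts"))).1 → x = ((10 : Int), ("functional_task", "taichi", "category:martial_arts"))) := by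
                          intro x hx
                          rcases (hanHits_iff (PySem.Str.lower s) x).mp hx with ⟨hin, rfl⟩|⟨hin, rfl⟩|⟨hin, rfl⟩|⟨hin, rfl⟩|⟨hin, rfl⟩|⟨hin, rfl⟩|⟨hin, rfl⟩|⟨hin, rfl⟩|⟨hin, rfl⟩|⟨hin, rfl⟩|⟨hin, rfl⟩|⟨hin, rfl⟩|⟨hin, rfl⟩|⟨hin, rfl⟩|⟨hin, rfl⟩|⟨hin, rfl⟩|⟨hin, rfl⟩ <;>
                            first | decide | simp_all
                        rw [alt_of_minFold s _ (hanMinFold_eq_some _ _ hmem hall)]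
                        rfl
                      case false =>
                        cases h11 : (PySem.Str.isIn "lambada" (PySem.Str.lower s) || (PySem.Str.isIn "dance" (PySem.Str.lower s)))
                        case true =>
                          simp only [Bool.or_eq_true] at h11
                          have hmem : ((11 : Int), ("functional_task", "dance", "category:dance")) ∈ hanHits (PySem.Str.lower s) := (hanHits_iff (PySem.Str.lower s) _).mpr (Or.inr (Or.inr (Or.inr (Or.inr (Or.inr (Or.inr (Or.inr (Or.inr (Or.inr (Or.inr (Or.inr (Or.inl ⟨h11, rfl⟩))))))))))))
                          have hall : ∀ x ∈ hanHits (PySem.Str.lower s), (((11 : Int), ("functional_task", "dance", "category:dance"))).1 ≤ x.1 ∧ (x.1 ≤ (((11 : Int), ("functional_task", "dance", "category:dance"))).1 → x = ((11 : Int), ("functional_task", "dance", "category:dance"))) := by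
                            intro x hx
                            rcases (hanHits_iff (PySem.Str.lower s) x).mp hx with ⟨hin, rfl⟩|⟨hin, rfl⟩|⟨hin, rfl⟩|⟨hin, rfl⟩|⟨hin, rfl⟩|⟨hin, rfl⟩|⟨hin, rfl⟩|⟨hin, rfl⟩|⟨hin, rfl⟩|⟨hin, rfl⟩|⟨hin, rfl⟩|⟨hin, rfl⟩|⟨hin, rfl⟩|⟨hin, rfl⟩|⟨hin, rfl⟩|⟨hin, rfl⟩|⟨hin, rfl⟩ <;>
                              first | decide | simp_all
                          rw [alt_of_minFold s _ (hanMinFold_eq_some _ _ hmem hall)]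
                          rfl
                        case false =>
                          cases h12 : (PySem.Str.isIn "high_leg" (PySem.Str.lower s) || (PySem.Str.isIn "highleg" (PySem.Str.lower s)))
                          case true =>
                            simp only [Bool.or_eq_true] at h12
                            have hmem : ((12 : Int), ("functional_task", "high_leg", "")) ∈ hanHits (PySem.Str.lower s) := (hanHits_iff (PySem.Str.lower s) _).mpr (Or.inr (Or.inr (Or.inr (Or.inr (Or.inr (Or.inr (Or.inr (Or.inr (Or.inr (Or.inr (Or.inr (Or.inr (Or.inl ⟨h12, rfl⟩)))))))))))))
                            have hall : ∀ x ∈ hanHits (PySem.Str.lower s), (((12 : Int), ("functional_task", "high_leg", ""))).1 ≤ x.1 ∧ (x.1 ≤ (((12 : Int), ("functional_task", "high_leg", ""))).1 → x = ((12 : Int), ("functional_task", "high_leg", ""))) := by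
                              intro x hx
                              rcases (hanHits_iff (PySem.Str.lower s) x).mp hx with ⟨hin, rfl⟩|⟨hin, rfl⟩|⟨hin, rfl⟩|⟨hin, rfl⟩|⟨hin, rfl⟩|⟨hin, rfl⟩|⟨hin, rfl⟩|⟨hin, rfl⟩|⟨hin, rfl⟩|⟨hin, rfl⟩|⟨hin, rfl⟩|⟨hin, rfl⟩|⟨hin, rfl⟩|⟨hin, rfl⟩|⟨hin, rfl⟩|⟨hin, rfl⟩|⟨hin, rfl⟩ <;>
                                first | decide | simp_all
                            rw [alt_of_minFold s _ (hanMinFold_eq_some _ _ hmem hall)]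
                            rfl
                          case false =>
                            cases h13 : (PySem.Str.isIn "swing" (PySem.Str.lower s) || (PySem.Str.isIn "tennis" (PySem.Str.lower s)))
                            case true =>
                              simp only [Bool.or_eq_true] at h13
                              have hmem : ((13 : Int), ("functional_task", "tennis_swing", "category:sports")) ∈ hanHits (PySem.Str.lower s) := (hanHits_iff (PySem.Str.lower s) _).mpr (Or.inr (Or.inr (Or.inr (Or.inr (Or.inr (Or.inr (Or.inr (Or.inr (Or.inr (Or.inr (Or.inr (Or.inr (Or.inr (Or.inl ⟨h13, rfl⟩))))))))))))))
                              have hall : ∀ x ∈ hanHits (PySem.Str.lower s), (((13 : Int), ("functional_task", "tennis_swing", "category:sports"))).1 ≤ x.1 ∧ (x.1 ≤ (((13 : Int), ("functional_task", "tennis_swing", "category:sports"))).1 → x = ((13 : Int), ("functional_task", "tennis_swing", "category:sports"))) := by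
                                intro x hx
                                rcases (hanHits_iff (PySem.Str.lower s) x).mp hx with ⟨hin, rfl⟩|⟨hin, rfl⟩|⟨hin, rfl⟩|⟨hin, rfl⟩|⟨hin, rfl⟩|⟨hin, rfl⟩|⟨hin, rfl⟩|⟨hin, rfl⟩|⟨hin, rfl⟩|⟨hin, rfl⟩|⟨hin, rfl⟩|⟨hin, rfl⟩|⟨hin, rfl⟩|⟨hin, rfl⟩|⟨hin, rfl⟩|⟨hin, rfl⟩|⟨hin, rfl⟩ <;>
                                  first | decide | simp_all
                              rw [alt_of_minFold s _ (hanMinFold_eq_some _ _ hmem hall)]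
                              rfl
                            case false =>
                              cases h14 : (PySem.Str.isIn "serv" (PySem.Str.lower s))
                              case true =>
                                have hmem : ((14 : Int), ("functional_task", "tennis_serve", "category:sports")) ∈ hanHits (PySem.Str.lower s) := (hanHits_iff (PySem.Str.lower s) _).mpr (Or.inr (Or.inr (Or.inr (Or.inr (Or.inr (Or.inr (Or.inr (Or.inr (Or.inr (Or.inr (Or.inr (Or.inr (Or.inr (Or.inr (Or.inl ⟨h14, rfl⟩)))))))))))))))
                                have hall : ∀ x ∈ hanHits (PySem.Str.lower s), (((14 : Int), ("functional_task", "tennis_serve", "category:sports"))).1 ≤ x.1 ∧ (x.1 ≤ (((14 : Int), ("functional_task", "tennis_serve", "category:sports"))).1 → x = ((14 : Int), ("functional_task", "tennis_serve", "category:sports"))) := by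
                                  intro x hx
                                  rcases (hanHits_iff (PySem.Str.lower s) x).mp hx with ⟨hin, rfl⟩|⟨hin, rfl⟩|⟨hin, rfl⟩|⟨hin, rfl⟩|⟨hin, rfl⟩|⟨hin, rfl⟩|⟨hin, rfl⟩|⟨hin, rfl⟩|⟨hin, rfl⟩|⟨hin, rfl⟩|⟨hin, rfl⟩|⟨hin, rfl⟩|⟨hin, rfl⟩|⟨hin, rfl⟩|⟨hin, rfl⟩|⟨hin, rfl⟩|⟨hin, rfl⟩ <;>
                                    first | decide | simp_all
                                rw [alt_of_minFold s _ (hanMinFold_eq_some _ _ hmem hall)]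
                                rfl
                              case false =>
                                cases h15 : (PySem.Str.isIn "kick" (PySem.Str.lower s) || (PySem.Str.isIn "soccer" (PySem.Str.lower s)))
                                case true =>
                                  simp only [Bool.or_eq_true] at h15
                                  have hmem : ((15 : Int), ("functional_task", "soccer_kick", "category:sports")) ∈ hanHits (PySem.Str.lower s) := (hanHits_iff (PySem.Str.lower s) _).mpr (Or.inr (Or.inr (Or.inr (Or.inr (Or.inr (Or.inr (Or.inr (Or.inr (Or.inr (Or.inr (Or.inr (Or.inr (Or.inr (Or.inr (Or.inr (Or.inl ⟨h15, rfl⟩))))))))))))))))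
                                  have hall : ∀ x ∈ hanHits (PySem.Str.lower s), (((15 : Int), ("functional_task", "soccer_kick", "category:sports"))).1 ≤ x.1 ∧ (x.1 ≤ (((15 : Int), ("functional_task", "soccer_kick", "category:sports"))).1 → x = ((15 : Int), ("functional_task", "soccer_kick", "category:sports"))) := by
                                    intro x hx
                                    rcases (hanHits_iff (PySem.Str.lower s) x).mp hx with ⟨hin, rfl⟩|⟨hin, rfl⟩|⟨hin, rfl⟩|⟨hin, rfl⟩|⟨hin, rfl⟩|⟨hin, rfl⟩|⟨hin, rfl⟩|⟨hin, rfl⟩|⟨hin, rfl⟩|⟨hin, rfl⟩|⟨hin, rfl⟩|⟨hin, rfl⟩|⟨hin, rfl⟩|⟨hin, rfl⟩|⟨hin, rfl⟩|⟨hin, rfl⟩|⟨hin, rfl⟩ <;>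
                                      first | decide | simp_all
                                  rw [alt_of_minFold s _ (hanMinFold_eq_some _ _ hmem hall)]
                                  rfl
                                case false =>
                                  cases h16 : (PySem.Str.isIn "stand" (PySem.Str.lower s) || (PySem.Str.isIn "idle" (PySem.Str.lower s) || (PySem.Str.isIn "casual" (PySem.Str.lower s))))
                                  case true =>
                                    simp only [Bool.or_eq_true] at h16
                                    have hmem : ((16 : Int), ("balance_pose", "casual_stand", "")) ∈ hanHits (PySem.Str.lower s) := (hanHits_iff (PySem.Str.lower s) _).mpr (Or.inr (Or.inr (Or.inr (Or.inr (Or.inr (Or.inr (Or.inr (Or.inr (Or.inr (Or.inr (Or.inr (Or.inr (Or.inr (Or.inr (Or.inr (Or.inr (⟨h16, rfl⟩)))))))))))))))))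
                                    have hall : ∀ x ∈ hanHits (PySem.Str.lower s), (((16 : Int), ("balance_pose", "casual_stand", ""))).1 ≤ x.1 ∧ (x.1 ≤ (((16 : Int), ("balance_pose", "casual_stand", ""))).1 → x = ((16 : Int), ("balance_pose", "casual_stand", ""))) := by
                                      intro x hx
                                      rcases (hanHits_iff (PySem.Str.lower s) x).mp hx with ⟨hin, rfl⟩|⟨hin, rfl⟩|⟨hin, rfl⟩|⟨hin, rfl⟩|⟨hin, rfl⟩|⟨hin, rfl⟩|⟨hin, rfl⟩|⟨hin, rfl⟩|⟨hin, rfl⟩|⟨hin, rfl⟩|⟨hin, rfl⟩|⟨hin, rfl⟩|⟨hin, rfl⟩|⟨hin, rfl⟩|⟨hin, rfl⟩|⟨hin, rfl⟩|⟨hin, rfl⟩ <;>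
                                        first | decide | simp_all
                                    rw [alt_of_minFold s _ (hanMinFold_eq_some _ _ hmem hall)]
                                    rfl
                                  case false =>
                                    have hempty : hanHits (PySem.Str.lower s) = [] := by
                                      rw [List.eq_nil_iff_forall_not_mem]
                                      intro x hx
                                      rcases (hanHits_iff (PySem.Str.lower s) x).mp hx with ⟨hin, rfl⟩|⟨hin, rfl⟩|⟨hin, rfl⟩|⟨hin, rfl⟩|⟨hin, rfl⟩|⟨hin, rfl⟩|⟨hin, rfl⟩|⟨hin, rfl⟩|⟨hin, rfl⟩|⟨hin, rfl⟩|⟨hin, rfl⟩|⟨hin, rfl⟩|⟨hin, rfl⟩|⟨hin, rfl⟩|⟨hin, rfl⟩|⟨hin, rfl⟩|⟨hin, rfl⟩ <;> simp_all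
                                    rw [alt_of_empty s hempty]
                                    rfl
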